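-- pv_equiv track=rewrite | github.com/coltonw/instantaneous | simulate.py | combineHighestWins
-- ===== SOURCE A (Python) =====
-- def combineHighestWins(highestWins, wins):
--     names = []
--     maxWins = 0
--     for name, w in wins.items():
--         if w == maxWins:
--             names.append(name)
--         if w > maxWins:
--             names = [name]
--             maxWins = w
--     for name in names:
--         highestWins[name] = highestWins.get(name, 0) + 1
--     return highestWins
-- ===== SOURCE B (Python) =====
-- def combineHighestWins(highestWins, wins):
--     m = max([0, *wins.values()])
--     names = [n for n, w in wins.items() if w == m]
--     for name in names:
--         highestWins[name] = highestWins.get(name, 0) + 1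
--     return highestWins
-- ===== Notes on version B (the rewrite author's own statement) =====
-- stated objective: idiomatic
-- what changed: A's single pass that maintains and resets a running best-list is replaced by computing the maximum (floored at 0) once and then filtering the names equal to it.
import Mathlib
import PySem

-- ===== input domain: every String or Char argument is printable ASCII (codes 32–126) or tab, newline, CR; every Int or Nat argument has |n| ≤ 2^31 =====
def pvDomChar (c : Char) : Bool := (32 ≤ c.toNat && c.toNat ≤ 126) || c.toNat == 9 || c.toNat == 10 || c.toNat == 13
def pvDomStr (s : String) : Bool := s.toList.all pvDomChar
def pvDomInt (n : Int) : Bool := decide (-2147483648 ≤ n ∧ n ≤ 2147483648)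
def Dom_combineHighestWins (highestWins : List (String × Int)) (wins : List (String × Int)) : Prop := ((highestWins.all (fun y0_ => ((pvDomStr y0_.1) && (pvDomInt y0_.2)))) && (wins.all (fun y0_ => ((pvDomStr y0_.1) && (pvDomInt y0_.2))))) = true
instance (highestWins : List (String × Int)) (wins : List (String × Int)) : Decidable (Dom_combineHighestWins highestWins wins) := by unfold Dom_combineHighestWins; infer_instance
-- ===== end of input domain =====

-- B replaces A's running best-list pass by computing the max (floored at 0) once and filtering; return-value
-- equivalence only: both Pythons mutate the highestWins dict in place the same way.

-- ===== PORT A =====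
-- one iteration of A's first loop: the running (names, maxWins) state
def pvStepA (st : List String × Int) (p : String × Int) : List String × Int :=
  let names := if p.2 == st.2 then st.1 ++ [p.1] else st.1
  if p.2 > st.2 then ([p.1], p.2) else (names, st.2)

def combineHighestWins (highestWins : List (String × Int)) (wins : List (String × Int)) : List (String × Int) :=
  let st := wins.foldl pvStepA ([], 0)
  (st.1.foldl (fun d n => d.insert n (d.getD n 0 + 1)) (PySem.Dict.mk highestWins)).items

-- ===== PORT B =====
def combineHighestWins_alt (highestWins : List (String × Int)) (wins : List (String × Int)) : List (String × Int) :=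
  -- m = max([0, *wins.values()]); Python's max of the Int list, ported as a fold of max (exact)
  let m := (wins.map Prod.snd).foldl max 0
  let names := (wins.filter (fun p => p.2 == m)).map Prod.fst
  (names.foldl (fun d n => d.insert n (d.getD n 0 + 1)) (PySem.Dict.mk highestWins)).items

-- ===== PRECONDITION & SPEC =====
def Spec_combineHighestWins (highestWins : List (String × Int)) (wins : List (String × Int)) (out : List (String × Int)) : Prop := out = combineHighestWins_alt highestWins wins
instance (highestWins : List (String × Int)) (wins : List (String × Int)) (out : List (String × Int)) : Decidable (Spec_combineHighestWins highestWins wins out) := by unfold Spec_combineHighestWins; infer_instance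

-- ===== CLAIM (what is proved, stated in full; the proofs are below) =====
def Claim_equal_combineHighestWins : Prop := ∀ (highestWins : List (String × Int)) (wins : List (String × Int)), Dom_combineHighestWins highestWins wins → Spec_combineHighestWins highestWins wins (combineHighestWins highestWins wins)

-- ===== LEMMAS AND PROOFS =====

theorem le_foldl_max (l : List Int) (a : Int) : a ≤ l.foldl max a := by
  induction l generalizing a with
  | nil => simp
  | cons x t ih => exact le_trans (le_max_left a x) (ih (max a x))

-- characterisation of A's first loop: the final max is the fold of max over the values, and the
-- collected names are exactly the names whose value equals that max (prefixed by the starting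
-- accumulator when the max never moved)
theorem loopA_eq (ws : List (String × Int)) (ns : List String) (mx : Int) :
    ws.foldl pvStepA (ns, mx) =
      ((if (ws.map Prod.snd).foldl max mx = mx then ns else []) ++
        (ws.filter (fun p => p.2 == (ws.map Prod.snd).foldl max mx)).map Prod.fst,
       (ws.map Prod.snd).foldl max mx) := by
  induction ws generalizing ns mx with
  | nil => simp
  | cons p t ih =>
    simp only [List.foldl_cons, List.map_cons, List.filter_cons]
    rcases lt_trichotomy mx p.2 with h | h | h
    · have hstep : pvStepA (ns, mx) p = ([p.1], p.2) := by
        simp [pvStepA, h]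
      rw [hstep, ih]
      have hmax : max mx p.2 = p.2 := by omega
      have hM : p.2 ≤ (t.map Prod.snd).foldl max p.2 := le_foldl_max _ _
      have hne : ¬ ((t.map Prod.snd).foldl max p.2 = mx) := by omega
      simp only [hmax]
      by_cases he : (t.map Prod.snd).foldl max p.2 = p.2
      · simp [he, (show ¬ (p.2 = mx) by omega)]
      · have hne2 : ¬ (p.2 = (t.map Prod.snd).foldl max p.2) := fun h' => he h'.symm
        simp [he, hne, hne2]
    · have hstep : pvStepA (ns, mx) p = (ns ++ [p.1], mx) := by
        simp [pvStepA, h]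
      rw [hstep, ih]
      subst h
      simp only [max_self]
      by_cases he : (t.map Prod.snd).foldl max p.2 = p.2
      · simp [he]
      · have hne2 : ¬ (p.2 = (t.map Prod.snd).foldl max p.2) := fun h' => he h'.symm
        simp [he, hne2]
    · have hstep : pvStepA (ns, mx) p = (ns, mx) := by
        simp only [pvStepA, gt_iff_lt, if_neg (show ¬ mx < p.2 by omega),
          if_neg (show (p.2 == mx) ≠ true by simp; omega)]
      rw [hstep, ih]
      have hM : mx ≤ (t.map Prod.snd).foldl max mx := le_foldl_max _ _
      have hmax : max mx p.2 = mx := by omega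
      simp only [hmax]
      have hne : ¬ (p.2 = (t.map Prod.snd).foldl max mx) := by omega
      simp [hne]

-- ===== VERDICT (by name: the statement is the Claim_ definition above) =====
theorem combineHighestWins_spec : Claim_equal_combineHighestWins := by
  intro highestWins wins _
  unfold Spec_combineHighestWins combineHighestWins combineHighestWins_alt
  rw [loopA_eq]
  by_cases he : (wins.map Prod.snd).foldl max 0 = 0 <;> simp [he]
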